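-- pv_equiv track=rewrite | github.com/lightcodebaby/advent-of-code | year2015/solutions/day03.py | how_many_houses
-- ===== SOURCE A (Python) =====
-- def how_many_houses(input: str) -> int:
--     """Calculate how many houses receive at least one present.
--
--     Args:
--         input (str): Directions
--
--     Returns:
--         int: Houses that receive at least one present
--     """
--     houses = set()
--     santa_x, santa_y = 0, 0
--     robo_x, robo_y = 0, 0
--     houses.add((santa_x, santa_y))
--     houses.add((robo_x, robo_y))
--     for index, direction in enumerate(input):
--         if index % 2 == 0:
--             if direction == "^":
--                 santa_y += 1
--             elif direction == "v":
--                 santa_y -= 1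
--             elif direction == ">":
--                 santa_x += 1
--             elif direction == "<":
--                 santa_x -= 1
--             houses.add((santa_x, santa_y))
--         else:
--             if direction == "^":
--                 robo_y += 1
--             elif direction == "v":
--                 robo_y -= 1
--             elif direction == ">":
--                 robo_x += 1
--             elif direction == "<":
--                 robo_x -= 1
--             houses.add((robo_x, robo_y))
--     return len(houses)
-- ===== SOURCE B (Python) =====
-- def how_many_houses(input: str) -> int:
--     """Calculate how many houses receive at least one present.
--
--     De-interleaved version: Santa walks input[::2], Robo-Santa walks
--     input[1::2]; each walk is one cumulative pass, answer is the size of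
--     the union of the two visited-position sets.
--     """
--     deltas = {"^": (0, 1), "v": (0, -1), ">": (1, 0), "<": (-1, 0)}
--
--     def walk(moves):
--         x, y = 0, 0
--         pts = [(0, 0)]
--         for c in moves:
--             dx, dy = deltas.get(c, (0, 0))
--             x, y = x + dx, y + dy
--             pts.append((x, y))
--         return pts
--
--     return len(set(walk(input[::2])) | set(walk(input[1::2])))
-- ===== Notes on version B (the rewrite author's own statement) =====
-- stated objective: alternative
-- what changed: Instead of one interleaved loop branching on index parity with two mutable agent states, B de-interleaves the string into the two agents' move lists (input[::2], input[1::2]), computes each agent's cumulative path in its own simple pass, and returns the size of the union of the two visited sets.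
import Mathlib
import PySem

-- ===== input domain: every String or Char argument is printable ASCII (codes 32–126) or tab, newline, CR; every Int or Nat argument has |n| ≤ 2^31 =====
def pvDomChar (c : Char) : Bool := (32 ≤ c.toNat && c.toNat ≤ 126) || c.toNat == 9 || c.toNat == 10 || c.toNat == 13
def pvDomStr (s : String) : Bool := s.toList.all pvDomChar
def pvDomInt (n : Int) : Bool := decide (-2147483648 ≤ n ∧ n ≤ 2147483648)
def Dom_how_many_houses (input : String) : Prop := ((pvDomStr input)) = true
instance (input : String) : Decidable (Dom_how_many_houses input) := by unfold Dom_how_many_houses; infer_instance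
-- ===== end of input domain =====

-- B de-interleaves the input into the two agents' move lists (input[::2] / input[1::2]) and returns
-- the size of the union of their two cumulative-path sets, instead of A's single loop branching on
-- index parity with two mutable agent states (objective: alternative; same return value everywhere).


-- ===== PORT A =====
def how_many_houses (input : String) : Int :=
  let houses : PySem.Set (Int × Int) := PySem.Set.empty
  let houses := PySem.Set.add houses (0, 0)
  let houses := PySem.Set.add houses (0, 0)
  let st :=
    (PySem.List.enumerate input.toList 0).foldl
      (fun (st : ((Int × Int) × (Int × Int)) × PySem.Set (Int × Int)) ic =>
        let santa := st.1.1
        let robo := st.1.2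
        let houses := st.2
        let index := ic.1
        let direction := ic.2
        if PySem.Int.mod index 2 == 0 then
          let santa :=
            if direction == '^' then (santa.1, santa.2 + 1)
            else if direction == 'v' then (santa.1, santa.2 - 1)
            else if direction == '>' then (santa.1 + 1, santa.2)
            else if direction == '<' then (santa.1 - 1, santa.2)
            else santa
          ((santa, robo), PySem.Set.add houses santa)
        else
          let robo :=
            if direction == '^' then (robo.1, robo.2 + 1)
            else if direction == 'v' then (robo.1, robo.2 - 1)
            else if direction == '>' then (robo.1 + 1, robo.2)
            else if direction == '<' then (robo.1 - 1, robo.2)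
            else robo
          ((santa, robo), PySem.Set.add houses robo))
      (((0, 0), (0, 0)), houses)
  PySem.Set.len st.2

-- ===== PORT B =====
-- the dict literal 'deltas'
def pvDeltas : PySem.Dict Char (Int × Int) :=
  PySem.Dict.ofList [('^', (0, 1)), ('v', (0, -1)), ('>', (1, 0)), ('<', (-1, 0))]

-- the helper 'walk'
def pvWalk (moves : List Char) : List (Int × Int) :=
  (moves.foldl
    (fun (st : (Int × Int) × List (Int × Int)) c =>
      let d := PySem.Dict.getD pvDeltas c (0, 0)
      let p := (st.1.1 + d.1, st.1.2 + d.2)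
      (p, st.2 ++ [p]))
    ((0, 0), [((0, 0) : Int × Int)])).2

def how_many_houses_alt (input : String) : Int :=
  -- input[::2] and input[1::2] never raise (step ≠ 0), so the .getD [] branches are never taken
  let ev := (PySem.List.slice? input.toList none none 2).getD []
  let od := (PySem.List.slice? input.toList (some 1) none 2).getD []
  PySem.Set.len (PySem.Set.union (PySem.Set.ofList (pvWalk ev)) (PySem.Set.ofList (pvWalk od)))

-- ===== PRECONDITION & SPEC =====
def Spec_how_many_houses (input : String) (out : Int) : Prop := out = how_many_houses_alt input
instance (input : String) (out : Int) : Decidable (Spec_how_many_houses input out) := by unfold Spec_how_many_houses; infer_instance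

-- ===== CLAIM (what is proved, stated in full; the proofs are below) =====
def Claim_equal_how_many_houses : Prop := ∀ (input : String), Dom_how_many_houses input → Spec_how_many_houses input (how_many_houses input)

-- ===== LEMMAS AND PROOFS =====

-- one move as B's dict lookup computes it
def pvStep (p : Int × Int) (c : Char) : Int × Int :=
  (p.1 + (PySem.Dict.getD pvDeltas c (0, 0)).1, p.2 + (PySem.Dict.getD pvDeltas c (0, 0)).2)

-- positions visited after each successive move, starting from p (p itself excluded)
def pvTrail (p : Int × Int) : List Char → List (Int × Int)
  | [] => []
  | c :: cs => pvStep p c :: pvTrail (pvStep p c) cs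

-- every other element, starting with the first
def pvEvens : List Char → List Char
  | [] => []
  | [a] => [a]
  | a :: _ :: t => a :: pvEvens t

-- A's loop body, named for the proofs (syntactically the lambda in the port of A)
def pvAStep (st : ((Int × Int) × (Int × Int)) × PySem.Set (Int × Int)) (ic : Int × Char) :
    ((Int × Int) × (Int × Int)) × PySem.Set (Int × Int) :=
  let santa := st.1.1
  let robo := st.1.2
  let houses := st.2
  let index := ic.1
  let direction := ic.2
  if PySem.Int.mod index 2 == 0 then
    let santa :=
      if direction == '^' then (santa.1, santa.2 + 1)
      else if direction == 'v' then (santa.1, santa.2 - 1)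
      else if direction == '>' then (santa.1 + 1, santa.2)
      else if direction == '<' then (santa.1 - 1, santa.2)
      else santa
    ((santa, robo), PySem.Set.add houses santa)
  else
    let robo :=
      if direction == '^' then (robo.1, robo.2 + 1)
      else if direction == 'v' then (robo.1, robo.2 - 1)
      else if direction == '>' then (robo.1 + 1, robo.2)
      else if direction == '<' then (robo.1 - 1, robo.2)
      else robo
    ((santa, robo), PySem.Set.add houses robo)

lemma pvStep_chain (p : Int × Int) (c : Char) :
    pvStep p c =
      (if c == '^' then (p.1, p.2 + 1)
       else if c == 'v' then (p.1, p.2 - 1)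
       else if c == '>' then (p.1 + 1, p.2)
       else if c == '<' then (p.1 - 1, p.2)
       else p) := by
  have h : PySem.Dict.getD pvDeltas c (0, 0) =
      (if c == '^' then ((0:Int), (1:Int))
       else if c == 'v' then (0, -1)
       else if c == '>' then (1, 0)
       else if c == '<' then (-1, 0)
       else (0, 0)) := by
    simp [pvDeltas, PySem.Dict.ofList, PySem.Dict.getD, PySem.Dict.get?, PySem.Dict.update,
      PySem.Dict.insert, PySem.Dict.empty, PySem.Dict.contains, List.find?]
    by_cases h1 : c = '^' <;> by_cases h2 : c = 'v' <;> by_cases h3 : c = '>' <;> by_cases h4 : c = '<' <;> simp_all [eq_comm] <;>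
    · have e1 : ('^' == c) = false := beq_eq_false_iff_ne.mpr (fun e => h1 e.symm)
      have e2 : ('v' == c) = false := beq_eq_false_iff_ne.mpr (fun e => h2 e.symm)
      have e3 : ('>' == c) = false := beq_eq_false_iff_ne.mpr (fun e => h3 e.symm)
      have e4 : ('<' == c) = false := beq_eq_false_iff_ne.mpr (fun e => h4 e.symm)
      simp [e1, e2, e3, e4]
  rw [pvStep, h]
  split_ifs <;> simp <;> omega

lemma pvWalk_inv (ms : List Char) (p : Int × Int) (acc : List (Int × Int)) :
    (ms.foldl
      (fun (st : (Int × Int) × List (Int × Int)) c =>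
        let d := PySem.Dict.getD pvDeltas c (0, 0)
        let q := (st.1.1 + d.1, st.1.2 + d.2)
        (q, st.2 ++ [q])) (p, acc)).2
      = acc ++ pvTrail p ms := by
  induction ms generalizing p acc with
  | nil => simp [pvTrail]
  | cons c cs ih =>
    simp only [List.foldl_cons, pvTrail]
    rw [ih]
    simp [pvStep, List.append_assoc]

lemma pvWalk_eq (ms : List Char) : pvWalk ms = (0, 0) :: pvTrail (0, 0) ms := by
  simp [pvWalk, pvWalk_inv]

lemma filterMap_range_evens (xs : List Char) :
    (List.range ((xs.length + 1) / 2)).filterMap (fun k => xs[2 * k]?) = pvEvens xs := by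
  induction xs using pvEvens.induct with
  | case1 => simp [pvEvens]
  | case2 a => simp [pvEvens]
  | case3 a b t ih =>
    have hlen : (((a :: b :: t).length + 1) / 2) = (t.length + 1) / 2 + 1 := by
      simp; omega
    rw [hlen, List.range_succ_eq_map, List.filterMap_cons, List.filterMap_map]
    simp only [Nat.mul_zero, List.getElem?_cons_zero]
    show a :: List.filterMap _ _ = pvEvens (a :: b :: t)
    rw [pvEvens, ← ih]
    congr 1

lemma slice_evens (xs : List Char) :
    PySem.List.slice? xs none none 2 = some (pvEvens xs) := by
  rw [← filterMap_range_evens]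
  simp only [PySem.List.slice?, PySem.List.sliceIndices]
  norm_num
  have hc : (if 0 < xs.length then (((xs.length : Int) + 2 - 1) / 2).toNat else 0) = (xs.length + 1) / 2 := by
    split_ifs with h
    · omega
    · omega
  rw [hc]
  apply List.filterMap_congr
  intro k _
  congr 1

lemma slice_odds (xs : List Char) :
    PySem.List.slice? xs (some 1) none 2 = some (pvEvens xs.tail) := by
  cases xs with
  | nil => decide
  | cons a t =>
    rw [show (a :: t).tail = t from rfl, ← filterMap_range_evens]
    simp only [PySem.List.slice?, PySem.List.sliceIndices]
    norm_num
    have hc : (if 0 < t.length then (((t.length : Int) + 2 - 1) / 2).toNat else 0) = (t.length + 1) / 2 := by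
      split_ifs with h
      · omega
      · omega
    rw [hc]
    apply List.filterMap_congr
    intro k _
    have h2 : (1 + 2 * (k : Int)).toNat = 2 * k + 1 := by omega
    rw [h2, show (2 * k + 1) = (2 * k) + 1 from rfl, List.getElem?_cons_succ]

lemma pvEvens_cons (b : Char) (t : List Char) : pvEvens (b :: t) = b :: pvEvens t.tail := by
  cases t <;> simp [pvEvens]

lemma pvAStep_even (s r : Int × Int) (hs : PySem.Set (Int × Int)) (n : Int) (c : Char)
    (hn : PySem.Int.mod n 2 = 0) :
    pvAStep ((s, r), hs) (n, c) = ((pvStep s c, r), PySem.Set.add hs (pvStep s c)) := by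
  have hb : (PySem.Int.mod n 2 == 0) = true := beq_iff_eq.mpr hn
  simp only [pvAStep, hb, if_true, pvStep_chain]

lemma pvAStep_odd (s r : Int × Int) (hs : PySem.Set (Int × Int)) (n : Int) (c : Char)
    (hn : PySem.Int.mod n 2 ≠ 0) :
    pvAStep ((s, r), hs) (n, c) = ((s, pvStep r c), PySem.Set.add hs (pvStep r c)) := by
  have hb : (PySem.Int.mod n 2 == 0) = false := beq_eq_false_iff_ne.mpr hn
  simp only [pvAStep, hb, Bool.false_eq_true, if_false, pvStep_chain]

lemma mod_succ_of_even (n : Int) (hn : PySem.Int.mod n 2 = 0) : PySem.Int.mod (n + 1) 2 ≠ 0 := by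
  simp only [PySem.Int.mod, Int.fmod_eq_emod] at *
  omega

lemma mod_succ_succ_of_even (n : Int) (hn : PySem.Int.mod n 2 = 0) :
    PySem.Int.mod (n + 1 + 1) 2 = 0 := by
  simp only [PySem.Int.mod, Int.fmod_eq_emod] at *
  omega

lemma enumerate_cons (c : Char) (cs : List Char) (n : Int) :
    PySem.List.enumerate (c :: cs) n = (n, c) :: PySem.List.enumerate cs (n + 1) := by
  simp [PySem.List.enumerate]

lemma A_loop_mem (l : List Char) (n : Int) (hn : PySem.Int.mod n 2 = 0)
    (s r : Int × Int) (hs : PySem.Set (Int × Int)) (x : Int × Int) :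
    x ∈ ((PySem.List.enumerate l n).foldl pvAStep ((s, r), hs)).2 ↔
      x ∈ hs ∨ x ∈ pvTrail s (pvEvens l) ∨ x ∈ pvTrail r (pvEvens l.tail) := by
  induction l using pvEvens.induct generalizing n s r hs with
  | case1 =>
    simp [PySem.List.enumerate, pvEvens, pvTrail]
  | case2 a =>
    rw [enumerate_cons]
    simp only [List.foldl_cons, pvAStep_even s r hs n a hn]
    simp [PySem.List.enumerate, pvEvens, pvTrail, PySem.Set.mem_add]
  | case3 a b t ih =>
    rw [enumerate_cons, enumerate_cons]
    simp only [List.foldl_cons, pvAStep_even s r hs n a hn,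
      pvAStep_odd (pvStep s a) r _ (n + 1) b (mod_succ_of_even n hn),
      ih (n + 1 + 1) (mod_succ_succ_of_even n hn)]
    simp [pvEvens, pvEvens_cons, pvTrail, PySem.Set.mem_add]
    tauto

lemma A_loop_nodup (L : List (Int × Char)) (st : ((Int × Int) × (Int × Int)) × PySem.Set (Int × Int))
    (h : st.2.Nodup) : (L.foldl pvAStep st).2.Nodup := by
  induction L generalizing st with
  | nil => exact h
  | cons p L ih =>
    apply ih
    rw [pvAStep]
    split_ifs <;> exact PySem.Set.nodup_add _ _ h

-- ===== VERDICT (by name: the statement is the Claim_ definition above) =====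
theorem how_many_houses_spec : Claim_equal_how_many_houses := by
  intro input _
  show how_many_houses input = how_many_houses_alt input
  have hA : how_many_houses input =
      PySem.Set.len (((PySem.List.enumerate input.toList 0).foldl pvAStep
        ((((0, 0), (0, 0)) : (Int × Int) × (Int × Int)),
          PySem.Set.add (PySem.Set.add PySem.Set.empty (0, 0)) (0, 0))).2) := by
    unfold how_many_houses pvAStep
    rfl
  have hB : how_many_houses_alt input =
      PySem.Set.len (PySem.Set.union (PySem.Set.ofList (pvWalk (pvEvens input.toList)))
        (PySem.Set.ofList (pvWalk (pvEvens input.toList.tail)))) := by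
    rw [how_many_houses_alt]
    rw [slice_evens, slice_odds]
    rfl
  rw [hA, hB]
  set SA := ((PySem.List.enumerate input.toList 0).foldl pvAStep
      ((((0, 0), (0, 0)) : (Int × Int) × (Int × Int)),
        PySem.Set.add (PySem.Set.add PySem.Set.empty (0, 0)) (0, 0))).2 with hSA
  set SB := PySem.Set.union (PySem.Set.ofList (pvWalk (pvEvens input.toList)))
      (PySem.Set.ofList (pvWalk (pvEvens input.toList.tail))) with hSB
  have hmem : ∀ x, x ∈ SA ↔ x ∈ SB := by
    intro x
    rw [hSA, hSB]
    rw [A_loop_mem input.toList 0 (by decide)]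
    rw [PySem.Set.mem_union, PySem.Set.mem_ofList, PySem.Set.mem_ofList,
      pvWalk_eq, pvWalk_eq]
    simp only [PySem.Set.mem_add, List.mem_cons]
    have hemp : x ∈ (PySem.Set.empty : PySem.Set (Int × Int)) ↔ False := by
      simp [PySem.Set.empty]
    rw [hemp]
    tauto
  have hnodupA : SA.Nodup := A_loop_nodup _ _ (by decide)
  have hnodupB : SB.Nodup := PySem.Set.nodup_union _ _ (PySem.Set.nodup_ofList _)
  have hperm : SA.Perm SB := (List.perm_ext_iff_of_nodup hnodupA hnodupB).mpr hmem
  simp only [PySem.Set.len, hperm.length_eq]
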